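-- pv_equiv track=rewrite | github.com/florwilyn/- | Algorithms.py | get_Unsortedness
-- ===== SOURCE A (Python) =====
-- def get_Unsortedness(data):
--     counter = 0;
--     comparisons = 0
--     for index in range(1, len(data)):
--         counter+=1
--         while 0 < index and data[index] < data[index - 1]:
--             counter += 1
--             index -= 1
--
--     return counter
-- ===== SOURCE B (Python) =====
-- def get_Unsortedness(data):
--     if not data:
--         return 0
--     total = 0
--     run = 0
--     prev = data[0]
--     for y in data[1:]:
--         run = run + 1 if y < prev else 0
--         total += 1 + run
--         prev = y
--     return total
-- ===== Notes on version B (the rewrite author's own statement) =====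
-- stated objective: faster
-- what changed: Replaced A's per-index leftward while-loop re-walk with a single left-to-right pass maintaining the current descending-run length via run = run+1 if y < prev else 0.
import Mathlib
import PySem

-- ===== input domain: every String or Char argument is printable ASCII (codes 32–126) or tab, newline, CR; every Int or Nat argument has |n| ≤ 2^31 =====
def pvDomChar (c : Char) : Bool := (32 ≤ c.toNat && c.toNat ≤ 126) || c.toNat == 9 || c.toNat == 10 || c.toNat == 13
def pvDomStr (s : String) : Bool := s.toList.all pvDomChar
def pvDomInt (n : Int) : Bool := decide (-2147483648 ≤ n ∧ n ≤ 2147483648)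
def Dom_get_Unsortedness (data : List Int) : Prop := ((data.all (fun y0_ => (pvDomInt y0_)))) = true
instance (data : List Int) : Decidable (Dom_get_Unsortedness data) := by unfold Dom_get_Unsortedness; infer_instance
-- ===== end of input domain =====

-- B replaces A's quadratic index-by-index leftward re-walk with a single left-to-right pass
-- maintaining the current descending-run length (run = run+1 if y < prev else 0).

-- ===== PORT A =====
-- the inner 'while 0 < index and data[index] < data[index-1]' loop; indices are always in
-- range here (1 ≤ index < len(data)), so pyGetD with default 0 is exact
def pvWhileA (data : List Int) : Nat → Int → Int
  | 0, counter => counter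
  | i + 1, counter =>
      if PySem.List.pyGetD data ((i : Int) + 1) 0 < PySem.List.pyGetD data (i : Int) 0 then
        pvWhileA data i (counter + 1)
      else counter

def get_Unsortedness (data : List Int) : Int :=
  (PySem.List.pyRange 1 (data.length : Int) 1).foldl
    (fun counter index => pvWhileA data index.toNat (counter + 1)) 0

-- ===== PORT B =====
-- state = (prev, run, total)
def pvStepB (s : Int × Int × Int) (y : Int) : Int × Int × Int :=
  let run := if y < s.1 then s.2.1 + 1 else 0
  (y, run, s.2.2 + 1 + run)

def get_Unsortedness_alt (data : List Int) : Int :=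
  match data with
  | [] => 0
  | x :: xs => (xs.foldl pvStepB (x, 0, 0)).2.2

-- ===== PRECONDITION & SPEC =====
def Spec_get_Unsortedness (data : List Int) (out : Int) : Prop := out = get_Unsortedness_alt data
instance (data : List Int) (out : Int) : Decidable (Spec_get_Unsortedness data out) := by unfold Spec_get_Unsortedness; infer_instance

-- ===== CLAIM (what is proved, stated in full; the proofs are below) =====
def Claim_equal_get_Unsortedness : Prop := ∀ (data : List Int), Dom_get_Unsortedness data → Spec_get_Unsortedness data (get_Unsortedness data)

-- ===== LEMMAS AND PROOFS =====

-- the inner while-loop only adds to the running counter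
theorem pvWhileA_shift (data : List Int) (i : Nat) (c : Int) :
    pvWhileA data i c = c + pvWhileA data i 0 := by
  induction i generalizing c with
  | zero => simp [pvWhileA]
  | succ j ih =>
      simp only [pvWhileA]
      split
      · rw [ih (c + 1), ih (0 + 1)]; ring
      · simp

-- the inner loop started below the old length ignores an appended element
theorem pvWhileA_append (data : List Int) (x : Int) (i : Nat) (c : Int) (h : i < data.length) :
    pvWhileA (data ++ [x]) i c = pvWhileA data i c := by
  induction i generalizing c with
  | zero => simp [pvWhileA]
  | succ j ih =>
      have hj : j + 1 < data.length := h
      simp only [pvWhileA, PySem.List.pyGetD_natCast]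
      have h1 : (data ++ [x]).getD (j + 1) 0 = data.getD (j + 1) 0 := by
        simp [List.getD, List.getElem?_append_left hj]
      have h2 : (data ++ [x]).getD j 0 = data.getD j 0 := by
        simp [List.getD, List.getElem?_append_left (by omega : j < data.length)]
      rw [show ((j : Int) + 1) = ((j + 1 : Nat) : Int) by push_cast; ring,
          PySem.List.pyGetD_natCast, PySem.List.pyGetD_natCast, h1, h2]
      split
      · exact ih (c + 1) (by omega)
      · rfl

-- main invariant: B's fold state after consuming the tail of a nonempty list is
-- (last element, current leftward-descending chain length at the last index, A's counter)
theorem pvInv (x : Int) (xs : List Int) :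
    xs.foldl pvStepB (x, 0, 0) =
      ((x :: xs).getLastD 0,
       pvWhileA (x :: xs) xs.length 0,
       get_Unsortedness (x :: xs)) := by
  induction xs using List.reverseRecOn with
  | nil => simp [pvWhileA, get_Unsortedness, PySem.List.pyRange_one_eq_nil]
  | append_singleton ys z ih =>
      rw [show x :: (ys ++ [z]) = (x :: ys) ++ [z] by simp]
      set d : List Int := x :: ys with hd
      have hn : d.length = ys.length + 1 := by simp [hd]
      have hlast : (d ++ [z]).getLastD 0 = z := by simp
      -- length of the appended list
      have hlen2 : ((d ++ [z]).length : Int) = (d.length : Int) + 1 := by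
        simp [List.length_append]
      -- the new chain length
      have hget_z : PySem.List.pyGetD (d ++ [z]) ((ys.length : Int) + 1) 0 = z := by
        rw [show ((ys.length : Int) + 1) = ((ys.length + 1 : Nat) : Int) by push_cast; ring,
            PySem.List.pyGetD_natCast]
        simp [List.getD, hn]
      have hget_last : PySem.List.pyGetD (d ++ [z]) ((ys.length : Int)) 0 = d.getLastD 0 := by
        rw [PySem.List.pyGetD_natCast]
        have hlt : ys.length < d.length := by omega
        simp only [List.getD, List.getElem?_append_left hlt]
        rw [List.getElem?_eq_getElem (by omega)]
        rw [List.getLastD_eq_getLast?, List.getLast?_eq_getElem?]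
        rw [List.getElem?_eq_getElem (by omega)]
        simp [hn]
      have hchain :
          pvWhileA (d ++ [z]) (ys.length + 1) 0 =
            if z < d.getLastD 0 then pvWhileA d ys.length 0 + 1 else 0 := by
        simp only [pvWhileA, hget_z, hget_last, zero_add]
        split
        · rw [pvWhileA_append d z ys.length 1 (by omega), pvWhileA_shift]; ring
        · rfl
      -- A's counter on the appended list
      have hA : get_Unsortedness (d ++ [z]) =
          get_Unsortedness d + 1 + pvWhileA (d ++ [z]) (ys.length + 1) 0 := by
        unfold get_Unsortedness
        rw [hlen2, PySem.List.pyRange_one_succ_right (by omega : (1:Int) ≤ (d.length : Int)),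
            List.foldl_append]
        have hpre :
            (PySem.List.pyRange 1 (d.length : Int) 1).foldl
              (fun counter index => pvWhileA (d ++ [z]) index.toNat (counter + 1)) 0 =
            (PySem.List.pyRange 1 (d.length : Int) 1).foldl
              (fun counter index => pvWhileA d index.toNat (counter + 1)) 0 := by
          apply PySem.List.foldl_congr_mem
          intro acc idx hidx
          rw [PySem.List.mem_pyRange_one] at hidx
          exact pvWhileA_append d z idx.toNat (acc + 1)
            (by omega)
        rw [List.foldl, hpre]
        have htoNat : ((d.length : Int)).toNat = ys.length + 1 := by omega
        rw [htoNat, pvWhileA_shift]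
        rfl
      -- put it together
      rw [List.foldl_append, List.foldl, List.foldl, ih, hlast]
      have hlen4 : (ys ++ [z]).length = ys.length + 1 := by simp
      rw [hlen4]
      simp only [pvStepB]
      refine Prod.ext rfl (Prod.ext ?_ ?_)
      · simp only; rw [hchain]
      · simp only; rw [hA, hchain]

-- ===== VERDICT (by name: the statement is the Claim_ definition above) =====
theorem get_Unsortedness_spec : Claim_equal_get_Unsortedness := by
  intro data _
  unfold Spec_get_Unsortedness
  cases data with
  | nil => simp [get_Unsortedness, get_Unsortedness_alt, PySem.List.pyRange_one_eq_nil]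
  | cons x xs =>
      show get_Unsortedness (x :: xs) = (xs.foldl pvStepB (x, 0, 0)).2.2
      rw [pvInv]
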